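-- pv_equiv track=rewrite | github.com/freemjstudio/python_algorithm_interview | Boj/zoac3.py | pos_check
-- ===== SOURCE A (Python) =====
-- keyboard = ['qwertyuiop',
--             'asdfghjkl',
--             'zxcvbnm']
--
-- def pos_check(alphabet):
--     a_x, a_y = -1, -1
--     for i in range(len(keyboard)):
--         if alphabet in keyboard[i]:
--             a_x = i
--             for j in range(len(keyboard[i])):
--                 if keyboard[i][j] == alphabet:
--                     a_y = j
--
--     return a_x, a_y
-- ===== SOURCE B (Python) =====
-- keyboard = ['qwertyuiop',
--             'asdfghjkl',
--             'zxcvbnm']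
--
-- POS = {ch: (i, j) for i, row in enumerate(keyboard) for j, ch in enumerate(row)}
--
-- def pos_check(alphabet):
--     return POS.get(alphabet, (-1, -1))
-- ===== Notes on version B (the rewrite author's own statement) =====
-- stated objective: idiomatic
-- what changed: Replaces A's nested row/column scanning loops with a position table built once at module load and a single dict lookup with a (-1,-1) default.
-- intended difference: On strings that are not a single character but occur as a substring of a keyboard row (e.g. '' or 'wer'), A returns (row, -1) because its substring test fires while its per-character scan cannot match, whereas B returns (-1, -1), the intended not-a-key answer for anything that is not a key character. — e.g. on pos_check(""): A returns (2, -1), B returns (-1, -1)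
import Mathlib
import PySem

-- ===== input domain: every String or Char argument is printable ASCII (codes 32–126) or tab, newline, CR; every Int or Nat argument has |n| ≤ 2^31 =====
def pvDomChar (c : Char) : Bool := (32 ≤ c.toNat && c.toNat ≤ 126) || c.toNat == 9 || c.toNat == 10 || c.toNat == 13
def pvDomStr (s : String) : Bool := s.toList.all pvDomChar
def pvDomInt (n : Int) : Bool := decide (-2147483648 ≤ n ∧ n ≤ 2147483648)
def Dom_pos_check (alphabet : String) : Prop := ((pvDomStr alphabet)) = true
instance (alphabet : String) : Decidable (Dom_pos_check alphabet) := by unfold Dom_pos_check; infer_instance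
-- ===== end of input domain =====

-- B replaces A's nested row/column scanning with a position table built once and a single
-- dict lookup defaulting to (-1, -1).

-- ===== PORT A =====
def pvKeyboard : List String := ["qwertyuiop", "asdfghjkl", "zxcvbnm"]

def pos_check (alphabet : String) : Int × Int :=
  (PySem.List.pyRange 0 (pvKeyboard.length) 1).foldl (fun (st : Int × Int) i =>
    let row := PySem.List.pyGetD pvKeyboard i ""
    if PySem.Str.isIn alphabet row then
      -- a_x = i, then the inner scan for a_y
      (PySem.List.pyRange 0 (PySem.Str.len row) 1).foldl (fun (st2 : Int × Int) j =>
        -- keyboard[i][j] == alphabet : the 1-character string at j compared with alphabet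
        if (PySem.Str.pyGet? row j).map (fun c => String.ofList [c]) == some alphabet then
          (st2.1, j)
        else st2) (i, st.2)
    else st) (-1, -1)

-- ===== PORT B =====
def pvPOS : PySem.Dict String (Int × Int) :=
  (PySem.List.enumerate pvKeyboard).foldl (fun d p =>
    (PySem.List.enumerate p.2.toList).foldl (fun d2 q =>
      d2.insert (String.ofList [q.2]) (p.1, q.1)) d) PySem.Dict.empty

def pos_check_alt (alphabet : String) : Int × Int :=
  pvPOS.getD alphabet (-1, -1)

-- ===== PRECONDITION & SPEC =====
-- On strings that are not a single character but occur as a substring of a keyboard row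
-- (e.g. '' or 'wer'), A returns (row, -1) because its substring test fires while its
-- per-character scan cannot match; B returns (-1, -1), the intended not-a-key answer.
def D_pos_check (alphabet : String) : Prop :=
  alphabet.toList.length ≠ 1 ∧
    (alphabet.toList <:+: "qwertyuiop".toList ∨
     alphabet.toList <:+: "asdfghjkl".toList ∨
     alphabet.toList <:+: "zxcvbnm".toList)
instance (alphabet : String) : Decidable (D_pos_check alphabet) := by
  unfold D_pos_check; infer_instance

def Spec_pos_check (alphabet : String) (out : Int × Int) : Prop :=
  ¬ D_pos_check alphabet → out = pos_check_alt alphabet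
instance (alphabet : String) (out : Int × Int) : Decidable (Spec_pos_check alphabet out) := by
  unfold Spec_pos_check; infer_instance

def pvDiffWitness_pos_check : String := ""
def pvDiffWitnessOut_pos_check : (Int × Int) × (Int × Int) := ((2, -1), (-1, -1))

-- ===== CLAIM (what is proved, stated in full; the proofs are below) =====
def Claim_unchanged_pos_check : Prop :=
  ∀ (alphabet : String), Dom_pos_check alphabet → Spec_pos_check alphabet (pos_check alphabet)
def Claim_changed_pos_check : Prop :=
  Dom_pos_check (pvDiffWitness_pos_check) ∧ D_pos_check (pvDiffWitness_pos_check) ∧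
  pos_check (pvDiffWitness_pos_check) = pvDiffWitnessOut_pos_check.1 ∧
  pos_check_alt (pvDiffWitness_pos_check) = pvDiffWitnessOut_pos_check.2 ∧
  pvDiffWitnessOut_pos_check.1 ≠ pvDiffWitnessOut_pos_check.2
def Claim_exact_pos_check : Prop :=
  ∀ (alphabet : String), Dom_pos_check alphabet → D_pos_check alphabet →
    pos_check alphabet ≠ pos_check_alt alphabet

-- ===== LEMMAS AND PROOFS =====

-- all key characters of the keyboard
def pvAllKeys : List Char :=
  ['q', 'w', 'e', 'r', 't', 'y', 'u', 'i', 'o', 'p',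
   'a', 's', 'd', 'f', 'g', 'h', 'j', 'k', 'l',
   'z', 'x', 'c', 'v', 'b', 'n', 'm']

-- the POS table as a literal association list
lemma pvPOS_eq : pvPOS = PySem.Dict.mk
    [("q", (0, 0)), ("w", (0, 1)), ("e", (0, 2)), ("r", (0, 3)), ("t", (0, 4)),
     ("y", (0, 5)), ("u", (0, 6)), ("i", (0, 7)), ("o", (0, 8)), ("p", (0, 9)),
     ("a", (1, 0)), ("s", (1, 1)), ("d", (1, 2)), ("f", (1, 3)), ("g", (1, 4)),
     ("h", (1, 5)), ("j", (1, 6)), ("k", (1, 7)), ("l", (1, 8)),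
     ("z", (2, 0)), ("x", (2, 1)), ("c", (2, 2)), ("v", (2, 3)), ("b", (2, 4)),
     ("n", (2, 5)), ("m", (2, 6))] := by decide

-- B returns the default on any string that is [c] for no key character c
lemma alt_miss {s : String} (h : ∀ c ∈ pvAllKeys, s.toList ≠ [c]) :
    pos_check_alt s = (-1, -1) := by
  have key : ∀ (k : String) (c : Char), k.toList = [c] → c ∈ pvAllKeys → (k == s) = false := by
    intro k c hk hc
    rcases Bool.eq_false_or_eq_true (k == s) with ht | hf
    · exact absurd ((beq_iff_eq.1 ht) ▸ hk) (h c hc)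
    · exact hf
  simp [pos_check_alt, pvPOS_eq, PySem.Dict.getD, PySem.Dict.get?,
    key "q" 'q' rfl (by decide), key "w" 'w' rfl (by decide), key "e" 'e' rfl (by decide),
    key "r" 'r' rfl (by decide), key "t" 't' rfl (by decide), key "y" 'y' rfl (by decide),
    key "u" 'u' rfl (by decide), key "i" 'i' rfl (by decide), key "o" 'o' rfl (by decide),
    key "p" 'p' rfl (by decide), key "a" 'a' rfl (by decide), key "s" 's' rfl (by decide),
    key "d" 'd' rfl (by decide), key "f" 'f' rfl (by decide), key "g" 'g' rfl (by decide),
    key "h" 'h' rfl (by decide), key "j" 'j' rfl (by decide), key "k" 'k' rfl (by decide),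
    key "l" 'l' rfl (by decide), key "z" 'z' rfl (by decide), key "x" 'x' rfl (by decide),
    key "c" 'c' rfl (by decide), key "v" 'v' rfl (by decide), key "b" 'b' rfl (by decide),
    key "n" 'n' rfl (by decide), key "m" 'm' rfl (by decide)]

lemma alt_of_len_ne_one {s : String} (h : s.toList.length ≠ 1) :
    pos_check_alt s = (-1, -1) :=
  alt_miss (fun _ _ he => h (by rw [he]; rfl))

-- the inner scan of A never changes the first component
lemma inner_fst (l : List Int) (cond : Int → Bool) (st : Int × Int) :
    (l.foldl (fun s j => if cond j then (s.1, j) else s) st).1 = st.1 := by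
  induction l generalizing st with
  | nil => rfl
  | cons x xs ih =>
    simp only [List.foldl]
    rcases Bool.eq_false_or_eq_true (cond x) with ht | hf
    · rw [ht]; simpa using ih (st.1, x)
    · rw [hf]; simpa using ih st

-- A on a string that is a substring of some row: nonnegative first component
lemma pos_check_fst_of_infix {s : String}
    (h : s.toList <:+: "qwertyuiop".toList ∨ s.toList <:+: "asdfghjkl".toList ∨
         s.toList <:+: "zxcvbnm".toList) :
    0 ≤ (pos_check s).1 := by
  have hR : PySem.List.pyRange 0 (pvKeyboard.length) 1 = [0, 1, 2] := by decide
  simp only [pos_check, hR, List.foldl]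
  rcases Bool.eq_false_or_eq_true (PySem.Str.isIn s (PySem.List.pyGetD pvKeyboard 2 "")) with h2t | h2f
  · simp only [h2t, if_true]
    rw [inner_fst]
    norm_num
  · simp only [h2f, Bool.false_eq_true, if_false]
    rcases Bool.eq_false_or_eq_true (PySem.Str.isIn s (PySem.List.pyGetD pvKeyboard 1 "")) with h1t | h1f
    · simp only [h1t, if_true]
      rw [inner_fst]
      norm_num
    · simp only [h1f, Bool.false_eq_true, if_false]
      rcases Bool.eq_false_or_eq_true (PySem.Str.isIn s (PySem.List.pyGetD pvKeyboard 0 "")) with h0t | h0f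
      · simp only [h0t, if_true]
        rw [inner_fst]
      · exfalso
        rcases h with h | h | h
        · exact absurd ((PySem.Str.isIn_iff_infix s "qwertyuiop").2 (by simpa using h))
            (by simpa [pvKeyboard, PySem.List.pyGetD] using h0f)
        · exact absurd ((PySem.Str.isIn_iff_infix s "asdfghjkl").2 (by simpa using h))
            (by simpa [pvKeyboard, PySem.List.pyGetD] using h1f)
        · exact absurd ((PySem.Str.isIn_iff_infix s "zxcvbnm").2 (by simpa using h))
            (by simpa [pvKeyboard, PySem.List.pyGetD] using h2f)

-- A on a string that is a substring of no row returns (-1, -1)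
lemma pos_check_of_no_infix {s : String}
    (h : ¬ (s.toList <:+: "qwertyuiop".toList ∨ s.toList <:+: "asdfghjkl".toList ∨
            s.toList <:+: "zxcvbnm".toList)) :
    pos_check s = (-1, -1) := by
  rw [not_or, not_or] at h
  obtain ⟨h0, h1, h2⟩ := h
  have hR : PySem.List.pyRange 0 (pvKeyboard.length) 1 = [0, 1, 2] := by decide
  have e0 : PySem.Str.isIn s (PySem.List.pyGetD pvKeyboard 0 "") = false := by
    rw [show PySem.List.pyGetD pvKeyboard 0 "" = "qwertyuiop" from rfl,
        ← Bool.not_eq_true, PySem.Str.isIn_iff_infix]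
    simpa using h0
  have e1 : PySem.Str.isIn s (PySem.List.pyGetD pvKeyboard 1 "") = false := by
    rw [show PySem.List.pyGetD pvKeyboard 1 "" = "asdfghjkl" from rfl,
        ← Bool.not_eq_true, PySem.Str.isIn_iff_infix]
    simpa using h1
  have e2 : PySem.Str.isIn s (PySem.List.pyGetD pvKeyboard 2 "") = false := by
    rw [show PySem.List.pyGetD pvKeyboard 2 "" = "zxcvbnm" from rfl,
        ← Bool.not_eq_true, PySem.Str.isIn_iff_infix]
    simpa using h2
  simp only [pos_check, hR, List.foldl, e0, e1, e2, Bool.false_eq_true, if_false]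

-- single key characters: both programs computed by decide after identifying the string
lemma single_key_case {s : String} {c : Char} (hl : s.toList = [c])
    (hc : c ∈ pvAllKeys) : pos_check s = pos_check_alt s := by
  have hs : s = String.ofList [c] := String.toList_inj.1 (by simp [hl])
  subst hs
  fin_cases hc <;> decide

-- single non-key characters: both programs return (-1, -1)
lemma single_nonkey_case {s : String} {c : Char} (hl : s.toList = [c])
    (hc : c ∉ pvAllKeys) : pos_check s = pos_check_alt s := by
  have hsub0 : (['q','w','e','r','t','y','u','i','o','p'] : List Char) ⊆ pvAllKeys := by decide
  have hsub1 : (['a','s','d','f','g','h','j','k','l'] : List Char) ⊆ pvAllKeys := by decide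
  have hsub2 : (['z','x','c','v','b','n','m'] : List Char) ⊆ pvAllKeys := by decide
  have hno : ¬ (s.toList <:+: "qwertyuiop".toList ∨ s.toList <:+: "asdfghjkl".toList ∨
      s.toList <:+: "zxcvbnm".toList) := by
    rw [hl, show "qwertyuiop".toList = ['q','w','e','r','t','y','u','i','o','p'] from rfl,
        show "asdfghjkl".toList = ['a','s','d','f','g','h','j','k','l'] from rfl,
        show "zxcvbnm".toList = ['z','x','c','v','b','n','m'] from rfl]
    rintro (h | h | h)
    · exact hc (hsub0 ((List.singleton_infix_iff c _).1 h))
    · exact hc (hsub1 ((List.singleton_infix_iff c _).1 h))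
    · exact hc (hsub2 ((List.singleton_infix_iff c _).1 h))
  rw [pos_check_of_no_infix hno,
      alt_miss (fun k hk he => hc (by
        have h3 : c = k := by injection (hl.symm.trans he)
        rw [h3]; exact hk))]

-- ===== VERDICT =====
theorem pos_check_spec : Claim_unchanged_pos_check := by
  intro s _ hnD
  by_cases hl : s.toList.length = 1
  · rcases hx : s.toList with _ | ⟨c, rest⟩
    · rw [hx] at hl; simp at hl
    · have hrest : rest = [] := by
        rw [hx] at hl; simpa using hl
      rw [hrest] at hx
      by_cases hc : c ∈ pvAllKeys
      · exact single_key_case hx hc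
      · exact single_nonkey_case hx hc
  · unfold D_pos_check at hnD
    have hno := fun h2 => hnD ⟨hl, h2⟩
    rw [pos_check_of_no_infix hno, alt_of_len_ne_one hl]

theorem pos_check_changed : Claim_changed_pos_check := by
  unfold Claim_changed_pos_check; decide

theorem pos_check_tight : Claim_exact_pos_check := by
  intro s _ hD
  obtain ⟨hl, hinf⟩ := hD
  rw [alt_of_len_ne_one hl]
  intro heq
  have := pos_check_fst_of_infix hinf
  rw [heq] at this
  norm_num at this
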